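-- pv_equiv track=rewrite | github.com/JonOlav95/algorithm_x | exact_cover/algorithmx_helpers.py | exact_to_arr
-- ===== SOURCE A (Python) =====
-- def exact_to_arr(size, solution):
--     """Parse the dancing links matrix to a matrix of integers after solving.
--
--     Args:
--         size: The size of the puzzle.
--         solution: The rows which are part of the solution.
--
--     Returns:
--         A matrix of integers which shows the solution of the puzzle. Returns an empty
--         list if no solution was found.
--     """
--     if not solution:
--         return []
--
--     arr = []
--     row = []
--     subarray = []
--
--     for n in range(size):
--         subarray.append(n)
--
--     counter = 0
--     for i in range(size * size):
--
--         value = 0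
--
--         for k in range(len(subarray)):
--             if subarray[k] in solution:
--                 value = subarray[k] + 1
--                 break
--
--         if value != 0:
--             value = int(value - size * i)
--
--         counter += 1
--         row.append(value)
--
--         for j in range(size):
--             subarray[j] += size
--
--         if counter == size:
--             counter = 0
--             arr.append(row)
--             row = []
--
--     return arr
-- ===== SOURCE B (Python) =====
-- def exact_to_arr(size, solution):
--     """Single pass over the solution rows: each row index m in [0, size**3)
--     encodes cell m // size with candidate value m % size + 1; keep the minimal
--     candidate per cell, then fill the grid directly."""
--     if not solution:
--         return []
--     cap = size * size * size
--     best = {}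
--     for m in solution:
--         if 0 <= m < cap:
--             cell, k = divmod(m, size)
--             b = best.get(cell)
--             if b is None or k < b:
--                 best[cell] = k
--     return [[best.get(r * size + c, -1) + 1 for c in range(size)]
--             for r in range(size)]
-- ===== Notes on version B (the rewrite author's own statement) =====
-- stated objective: faster
-- what changed: Replaced the per-cell scan of the shifted subarray with a repeated 'in solution' membership test (O(size^2 * size * len(solution))) by a single pass over the solution that records the minimal value candidate per cell in a dict, then fills the grid by direct lookup.
import Mathlib
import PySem

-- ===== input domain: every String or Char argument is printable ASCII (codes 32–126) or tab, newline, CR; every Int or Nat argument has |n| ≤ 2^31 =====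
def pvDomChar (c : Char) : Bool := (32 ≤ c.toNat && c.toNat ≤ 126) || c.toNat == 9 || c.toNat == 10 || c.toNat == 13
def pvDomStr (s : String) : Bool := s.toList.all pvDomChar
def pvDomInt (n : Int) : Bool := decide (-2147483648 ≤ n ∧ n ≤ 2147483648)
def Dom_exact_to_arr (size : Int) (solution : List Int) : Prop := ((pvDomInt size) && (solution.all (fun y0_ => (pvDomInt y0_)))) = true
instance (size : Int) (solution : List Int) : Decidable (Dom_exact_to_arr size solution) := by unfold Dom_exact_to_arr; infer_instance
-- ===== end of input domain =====

-- B replaces A's per-cell scan over the shifted subarray (with repeated `in solution`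
-- membership tests) by one pass over `solution` recording the minimal candidate per cell
-- in a dict, then fills the grid by direct lookup; objective: faster (asymptotic).

-- ===== PORT A =====
-- inner loop 'for k in range(len(subarray)): if subarray[k] in solution: value = subarray[k] + 1; break'
def firstValA : List Int → List Int → Int
  | [], _ => 0
  | x :: xs, sol => if x ∈ sol then x + 1 else firstValA xs sol

-- body of A's loop 'for i in range(size * size)'; state = (subarray, counter, row, arr)
def stepA (size : Int) (solution : List Int)
    (st : List Int × Int × List Int × List (List Int)) (i : Int) :
    List Int × Int × List Int × List (List Int) :=
  let value := firstValA st.1 solution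
  let value := if value ≠ 0 then value - size * i else value
  let counter := st.2.1 + 1
  let row := st.2.2.1 ++ [value]
  let subarray := st.1.map (fun x => x + size)
  if counter = size then (subarray, 0, [], st.2.2.2 ++ [row])
  else (subarray, counter, row, st.2.2.2)

def exact_to_arr (size : Int) (solution : List Int) : List (List Int) :=
  if solution = [] then []
  else
    let subarray := (PySem.List.pyRange 0 size 1).foldl (fun acc n => acc ++ [n]) []
    ((PySem.List.pyRange 0 (size * size) 1).foldl (stepA size solution)
      (subarray, 0, [], [])).2.2.2

-- ===== PORT B =====
-- body of B's loop 'for m in solution'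
def stepB (size cap : Int) (d : PySem.Dict Int Int) (m : Int) : PySem.Dict Int Int :=
  if 0 ≤ m ∧ m < cap then
    let cell := PySem.Int.floordiv m size
    let k := PySem.Int.mod m size
    match PySem.Dict.get? d cell with
    | none => PySem.Dict.insert d cell k
    | some b => if k < b then PySem.Dict.insert d cell k else d
  else d

def exact_to_arr_alt (size : Int) (solution : List Int) : List (List Int) :=
  if solution = [] then []
  else
    let best := solution.foldl (stepB size (size * size * size)) PySem.Dict.empty
    (PySem.List.pyRange 0 size 1).map (fun r =>
      (PySem.List.pyRange 0 size 1).map (fun c =>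
        PySem.Dict.getD best (r * size + c) (-1) + 1))

-- ===== PRECONDITION & SPEC =====
def Spec_exact_to_arr (size : Int) (solution : List Int) (out : List (List Int)) : Prop := out = exact_to_arr_alt size solution
instance (size : Int) (solution : List Int) (out : List (List Int)) : Decidable (Spec_exact_to_arr size solution out) := by unfold Spec_exact_to_arr; infer_instance

-- ===== CLAIM (what is proved, stated in full; the proofs are below) =====
def Claim_equal_exact_to_arr : Prop := ∀ (size : Int) (solution : List Int), Dom_exact_to_arr size solution → Spec_exact_to_arr size solution (exact_to_arr size solution)

-- ===== LEMMAS AND PROOFS =====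

-- value of cell i (0-based over all size*size cells): first k in [0, size) with
-- k + size*i in solution gives k+1, else 0
def cv (size : Int) (sol : List Int) (i : Int) : Int :=
  match (PySem.List.pyRange 0 size 1).find? (fun k => decide (k + size * i ∈ sol)) with
  | some k => k + 1
  | none => 0

-- A's subarray after t iterations
def suba (size t : Int) : List Int := (PySem.List.pyRange 0 size 1).map (fun x => x + size * t)

def omin (o : Option Int) (k : Int) : Option Int :=
  match o with
  | none => some k
  | some b => if k < b then some k else some b

theorem firstValA_map (sol : List Int) (f : Int → Int) (rng : List Int) :
    firstValA (rng.map f) sol =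
      match rng.find? (fun k => decide (f k ∈ sol)) with
      | some k => f k + 1
      | none => 0 := by
  induction rng with
  | nil => rfl
  | cons a t ih =>
    by_cases h : f a ∈ sol <;> simp [firstValA, h, ih]

theorem stepA_eq (size : Int) (sol : List Int) (i c : Int) (row : List Int)
    (arr : List (List Int)) (hs : 0 < size) (hi : 0 ≤ i) :
    stepA size sol (suba size i, c, row, arr) i =
      if c + 1 = size then (suba size (i + 1), 0, [], arr ++ [row ++ [cv size sol i]])
      else (suba size (i + 1), c + 1, row ++ [cv size sol i], arr) := by
  have hsub : (suba size i).map (fun x => x + size) = suba size (i + 1) := by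
    unfold suba
    rw [List.map_map]
    apply List.map_congr_left
    intro x _
    simp only [Function.comp_apply]
    ring
  have hv : firstValA (suba size i) sol =
      match (PySem.List.pyRange 0 size 1).find? (fun k => decide (k + size * i ∈ sol)) with
      | some k => k + size * i + 1
      | none => 0 :=
    firstValA_map sol (fun x => x + size * i) (PySem.List.pyRange 0 size 1)
  cases hf : (PySem.List.pyRange 0 size 1).find? (fun k => decide (k + size * i ∈ sol)) with
  | none =>
    rw [hf] at hv
    unfold stepA cv
    rw [hf]
    simp only [hv, hsub]
    norm_num
  | some k =>
    have hk0 : 0 ≤ k := by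
      have hm := List.mem_of_find?_eq_some hf
      exact (PySem.List.mem_pyRange_one.mp hm).1
    have hne : k + size * i + 1 ≠ 0 := by positivity
    rw [hf] at hv
    unfold stepA cv
    rw [hf]
    simp only [hv, hsub, if_pos hne]
    have harith : k + size * i + 1 - size * i = k + 1 := by ring
    rw [harith]


theorem chunkA (size : Int) (sol : List Int) (hs : 0 < size) (b : Int) (hb : 0 ≤ b) :
    ∀ (c : Nat), (c : Int) ≤ size → ∀ (arr : List (List Int)),
      (PySem.List.pyRange b (b + c) 1).foldl (stepA size sol) (suba size b, 0, [], arr) =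
        if (c : Int) = size then
          (suba size (b + c), 0, [], arr ++ [(PySem.List.pyRange b (b + c) 1).map (cv size sol)])
        else
          (suba size (b + c), (c : Int), (PySem.List.pyRange b (b + c) 1).map (cv size sol), arr) := by
  intro c
  induction c with
  | zero =>
    intro _ arr
    rw [if_neg (by omega : ¬((0 : Nat) : Int) = size)]
    simp [PySem.List.pyRange_one_eq_nil (le_refl b)]
  | succ c ih =>
    intro hc1 arr
    have hc : (c : Int) < size := by push_cast at hc1; omega
    push_cast
    have hsplit : PySem.List.pyRange b (b + ((c : Int) + 1)) 1
        = PySem.List.pyRange b (b + c) 1 ++ [b + c] := by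
      rw [show b + ((c : Int) + 1) = (b + c) + 1 by ring]
      exact PySem.List.pyRange_one_succ_right (by omega)
    rw [hsplit, List.foldl_append]
    have ih' := ih (by omega) arr
    rw [if_neg (by omega)] at ih'
    rw [ih', List.foldl_cons, List.foldl_nil]
    rw [stepA_eq size sol (b + c) c _ arr hs (by omega)]
    split_ifs with h
    · simp [List.map_append, add_assoc]
    · simp [List.map_append, add_assoc]


theorem outerA (size : Int) (sol : List Int) (hs : 0 < size) :
    ∀ (n : Nat), (n : Int) ≤ size →
      (PySem.List.pyRange 0 (size * n) 1).foldl (stepA size sol) (suba size 0, 0, [], []) =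
        (suba size (size * n), 0, [],
          (PySem.List.pyRange 0 n 1).map (fun r =>
            (PySem.List.pyRange (size * r) (size * r + size) 1).map (cv size sol))) := by
  intro n
  induction n with
  | zero =>
    intro _
    simp [suba, PySem.List.pyRange_one_eq_nil (le_refl (0 : Int))]
  | succ n ih =>
    intro hn1
    have hn : (n : Int) < size := by push_cast at hn1; omega
    have hn0 : (0 : Int) ≤ size * n := mul_nonneg hs.le (by positivity)
    push_cast
    rw [show size * ((n : Int) + 1) = size * n + size by ring]
    rw [PySem.List.pyRange_one_append 0 (size * n) (size * n + size) hn0 (by omega),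
      List.foldl_append, ih (by omega)]
    have hchunk := chunkA size sol hs (size * n) hn0 size.toNat
      (by rw [Int.toNat_of_nonneg hs.le]) ((PySem.List.pyRange 0 n 1).map (fun r =>
        (PySem.List.pyRange (size * r) (size * r + size) 1).map (cv size sol)))
    rw [Int.toNat_of_nonneg hs.le, if_pos rfl] at hchunk
    rw [hchunk]
    rw [show PySem.List.pyRange 0 ((n : Int) + 1) 1 = PySem.List.pyRange 0 (n : Int) 1 ++ [(n : Int)]
      from PySem.List.pyRange_one_succ_right (by positivity), List.map_append]
    rfl


theorem closedA (size : Int) (sol : List Int) (hs : 0 < size) (hsol : sol ≠ []) :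
    exact_to_arr size sol =
      (PySem.List.pyRange 0 size 1).map (fun r =>
        (PySem.List.pyRange (size * r) (size * r + size) 1).map (cv size sol)) := by
  unfold exact_to_arr
  rw [if_neg hsol]
  rw [PySem.List.foldl_append_singleton]
  have hsub0 : (([] : List Int) ++ PySem.List.pyRange 0 size 1) = suba size 0 := by
    unfold suba
    simp
  have h := outerA size sol hs size.toNat (by rw [Int.toNat_of_nonneg hs.le])
  rw [Int.toNat_of_nonneg hs.le] at h
  rw [hsub0]
  exact congrArg (fun st : List Int × Int × List Int × List (List Int) => st.2.2.2) h


theorem nonposA (size : Int) (sol : List Int) (hs : ¬ 0 < size) :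
    exact_to_arr size sol = [] := by
  unfold exact_to_arr
  by_cases hsol : sol = []
  · simp [hsol]
  · simp only [if_neg hsol]
    rw [PySem.List.pyRange_one_eq_nil (show size ≤ 0 by omega)]
    simp only [List.foldl_nil]
    have key : ∀ (l : List Int) (c : Int) (row : List Int) (arr : List (List Int)), 0 ≤ c →
        (l.foldl (stepA size sol) (([] : List Int), c, row, arr)).2.2.2 = arr := by
      intro l
      induction l with
      | nil => intro c row arr _; rfl
      | cons a t ih =>
        intro c row arr hc
        have hstep : stepA size sol (([] : List Int), c, row, arr) a
            = (([] : List Int), c + 1, row ++ [(0 : Int)], arr) := by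
          unfold stepA firstValA
          simp only [List.map_nil]
          rw [if_neg (show ¬((0 : Int) ≠ 0) by simp), if_neg (show ¬(c + 1 = size) by omega)]
        rw [List.foldl_cons, hstep]
        exact ih (c + 1) _ arr (by omega)
    exact key _ 0 [] [] le_rfl


theorem bestGet (size cap : Int) :
    ∀ (l : List Int) (d : PySem.Dict Int Int) (c : Int),
      PySem.Dict.get? (l.foldl (stepB size cap) d) c =
        l.foldl (fun o m =>
          if (0 ≤ m ∧ m < cap) ∧ PySem.Int.floordiv m size = c then
            omin o (PySem.Int.mod m size) else o) (PySem.Dict.get? d c) := by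
  intro l
  induction l with
  | nil => intro d c; rfl
  | cons m t ih =>
    intro d c
    rw [List.foldl_cons, List.foldl_cons, ih]
    congr 1
    unfold stepB
    by_cases hg : 0 ≤ m ∧ m < cap
    · simp only [if_pos hg]
      by_cases hc : PySem.Int.floordiv m size = c
      · subst hc
        cases hget : PySem.Dict.get? d (PySem.Int.floordiv m size) with
        | none => simp [omin, hg]
        | some b =>
          by_cases hk : PySem.Int.mod m size < b
          · simp [hk, omin, hg]
          · simp [hk, omin, hg, hget]
      · rw [if_neg (by tauto)]
        cases hget : PySem.Dict.get? d (PySem.Int.floordiv m size) with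
        | none => simp [PySem.Dict.get?_insert, Ne.symm hc]
        | some b =>
          by_cases hk : PySem.Int.mod m size < b
          · simp [hk, PySem.Dict.get?_insert, Ne.symm hc]
          · simp [hk]
    · simp [hg]


theorem foldG_filterMap (size cap c : Int) :
    ∀ (l : List Int) (init : Option Int),
      l.foldl (fun o m =>
          if (0 ≤ m ∧ m < cap) ∧ PySem.Int.floordiv m size = c then
            omin o (PySem.Int.mod m size) else o) init =
        (l.filterMap (fun m =>
          if (0 ≤ m ∧ m < cap) ∧ PySem.Int.floordiv m size = c then
            some (PySem.Int.mod m size) else none)).foldl omin init := by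
  intro l
  induction l with
  | nil => intro init; rfl
  | cons m t ih =>
    intro init
    rw [List.foldl_cons]
    by_cases h : (0 ≤ m ∧ m < cap) ∧ PySem.Int.floordiv m size = c
    · simp only [if_pos h, List.filterMap_cons, ih]
      rfl
    · simp only [if_neg h, List.filterMap_cons, ih]


theorem foldl_omin_min? (ks : List Int) : ks.foldl omin none = ks.min? := by
  cases ks with
  | nil => rfl
  | cons a t =>
    rw [List.min?_cons']
    show t.foldl omin (some a) = some (t.foldl min a)
    induction t generalizing a with
    | nil => rfl
    | cons x xs ih =>
      rw [List.foldl_cons, List.foldl_cons]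
      have h2 : omin (some a) x = some (min a x) := by
        show (if x < a then some x else some a) = some (min a x)
        split_ifs with h
        · rw [min_eq_right h.le]
        · rw [min_eq_left (by omega)]
      rw [h2, ih]


theorem mem_sel (size i k : Int) (sol : List Int) (hs : 0 < size) (hi : 0 ≤ i)
    (hi2 : i < size * size) :
    k ∈ sol.filterMap (fun m =>
        if (0 ≤ m ∧ m < size * size * size) ∧ PySem.Int.floordiv m size = i then
          some (PySem.Int.mod m size) else none) ↔
      0 ≤ k ∧ k < size ∧ k + size * i ∈ sol := by
  rw [List.mem_filterMap]
  constructor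
  · rintro ⟨m, hm, hsel⟩
    by_cases hg : (0 ≤ m ∧ m < size * size * size) ∧ PySem.Int.floordiv m size = i
    · rw [if_pos hg] at hsel
      obtain ⟨⟨hm0, hmc⟩, hfd⟩ := hg
      have hk : k = PySem.Int.mod m size := by simpa using hsel.symm
      have h1 : 0 ≤ k := hk ▸ PySem.Int.mod_nonneg m hs
      have h2 : k < size := hk ▸ PySem.Int.mod_lt m hs
      have hm' : m = k + size * i := by
        have := PySem.Int.floordiv_mul_add_mod m size
        rw [hfd, ← hk] at this
        linarith
      exact ⟨h1, h2, hm' ▸ hm⟩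
    · rw [if_neg hg] at hsel
      exact absurd hsel (by simp)
  · rintro ⟨h1, h2, hmem⟩
    refine ⟨k + size * i, hmem, ?_⟩
    have hfd : PySem.Int.floordiv (k + size * i) size = i := by
      rw [PySem.Int.floordiv_eq_iff_of_pos hs]
      constructor <;> nlinarith
    have hmod : PySem.Int.mod (k + size * i) size = k := by
      have := PySem.Int.floordiv_mul_add_mod (k + size * i) size
      rw [hfd] at this
      linarith
    have hcap : k + size * i < size * size * size := by nlinarith
    rw [if_pos ⟨⟨by nlinarith, hcap⟩, hfd⟩, hmod]


theorem find?_sorted_min (xs : List Int) (p : Int → Bool) (k : Int)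
    (hx : xs.Pairwise (· < ·)) :
    xs.find? p = some k ↔ k ∈ xs ∧ p k ∧ ∀ k' ∈ xs, p k' → k ≤ k' := by
  induction xs with
  | nil => simp
  | cons a t ih =>
    have hpt : t.Pairwise (· < ·) := hx.tail
    have hat : ∀ x ∈ t, a < x := fun x hxm => (List.pairwise_cons.mp hx).1 x hxm
    by_cases hpa : p a = true
    · rw [List.find?_cons_of_pos hpa]
      constructor
      · rintro h
        have hak : a = k := by simpa using h
        subst hak
        refine ⟨List.mem_cons_self, hpa, ?_⟩
        intro k' hk' _
        rcases List.mem_cons.mp hk' with h1 | h1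
        · omega
        · exact (hat k' h1).le
      · rintro ⟨hmem, hpk, hmin⟩
        have hka : k ≤ a := hmin a List.mem_cons_self hpa
        rcases List.mem_cons.mp hmem with h1 | h1
        · rw [h1]
        · exact absurd (hat k h1) (by omega)
    · rw [List.find?_cons_of_neg hpa, ih hpt]
      constructor
      · rintro ⟨hmem, hpk, hmin⟩
        refine ⟨List.mem_cons_of_mem _ hmem, hpk, ?_⟩
        intro k' hk' hpk'
        rcases List.mem_cons.mp hk' with h1 | h1
        · exact absurd hpk' (h1 ▸ hpa)
        · exact hmin k' h1 hpk'
      · rintro ⟨hmem, hpk, hmin⟩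
        rcases List.mem_cons.mp hmem with h1 | h1
        · exact absurd hpk (h1 ▸ hpa)
        · exact ⟨h1, hpk, fun k' hk' hpk' => hmin k' (List.mem_cons_of_mem _ hk') hpk'⟩


theorem cellB (size i : Int) (sol : List Int) (hs : 0 < size) (hi : 0 ≤ i)
    (hi2 : i < size * size) :
    PySem.Dict.getD (sol.foldl (stepB size (size * size * size)) PySem.Dict.empty) i (-1) + 1 =
      cv size sol i := by
  rw [PySem.Dict.getD_eq_get?_getD, bestGet, foldG_filterMap]
  rw [show (PySem.Dict.get? (PySem.Dict.empty : PySem.Dict Int Int) i) = none from rfl]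
  rw [foldl_omin_min?]
  set ks := sol.filterMap (fun m =>
      if (0 ≤ m ∧ m < size * size * size) ∧ PySem.Int.floordiv m size = i then
        some (PySem.Int.mod m size) else none) with hks
  unfold cv
  cases hf : (PySem.List.pyRange 0 size 1).find? (fun k => decide (k + size * i ∈ sol)) with
  | none =>
    have hfe := List.find?_eq_none.mp hf
    have hnil : ks = [] := by
      rw [List.eq_nil_iff_forall_not_mem]
      intro k hk
      obtain ⟨h1, h2, h3⟩ := (mem_sel size i k sol hs hi hi2).mp hk
      exact hfe k (PySem.List.mem_pyRange_one.mpr ⟨h1, h2⟩) (by simpa using h3)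
    rw [hnil]
    simp
  | some k =>
    obtain ⟨hmem, hpk, hmin⟩ := (find?_sorted_min _ _ k
      (PySem.List.pairwise_lt_pyRange_one 0 size)).mp hf
    obtain ⟨hk0, hks'⟩ := PySem.List.mem_pyRange_one.mp hmem
    have hkin : k ∈ ks := (mem_sel size i k sol hs hi hi2).mpr ⟨hk0, hks', by simpa using hpk⟩
    have hmn : ks.min? = some k := by
      rw [List.min?_eq_some_iff]
      refine ⟨hkin, ?_⟩
      intro b hb
      obtain ⟨hb1, hb2, hb3⟩ := (mem_sel size i b sol hs hi hi2).mp hb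
      exact hmin b (PySem.List.mem_pyRange_one.mpr ⟨hb1, hb2⟩) (by simpa using hb3)
    rw [hmn]
    simp


theorem mainEq (size : Int) (sol : List Int) (hs : 0 < size) (hsol : sol ≠ []) :
    exact_to_arr size sol = exact_to_arr_alt size sol := by
  rw [closedA size sol hs hsol]
  simp only [exact_to_arr_alt, if_neg hsol]
  apply List.map_congr_left
  intro r hr
  obtain ⟨hr0, hrs⟩ := PySem.List.mem_pyRange_one.mp hr
  rw [PySem.List.pyRange_one 0 size, PySem.List.pyRange_one (size * r) (size * r + size)]
  rw [show (size * r + size - size * r) = size by ring, show ((size : Int) - 0) = size by ring]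
  rw [List.map_map, List.map_map]
  apply List.map_congr_left
  intro j hj
  simp only [Function.comp_apply]
  have hjs : (j : Int) < size := by
    have h1 := List.mem_range.mp hj
    have h2 := Int.toNat_of_nonneg hs.le
    omega
  have h0 : (0 : Int) ≤ r * size + (0 + (j : Int)) := by positivity
  have hlt : r * size + (0 + (j : Int)) < size * size := by nlinarith
  rw [cellB size (r * size + (0 + (j : Int))) sol hs h0 hlt]
  congr 1
  ring


-- ===== VERDICT (by name: the statement is the Claim_ definition above) =====
theorem exact_to_arr_spec : Claim_equal_exact_to_arr := by
  intro size sol _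
  unfold Spec_exact_to_arr
  by_cases hsol : sol = []
  · simp [exact_to_arr, exact_to_arr_alt, hsol]
  · by_cases hs : 0 < size
    · exact mainEq size sol hs hsol
    · rw [nonposA size sol hs]
      simp [exact_to_arr_alt, hsol, PySem.List.pyRange_one_eq_nil (by omega : size ≤ 0)]
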